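-- pv_equiv track=rewrite | github.com/stansz/agent-hive | trails/regroup.py | compute_sac_scale_from_segments
-- ===== SOURCE A (Python) =====
-- from typing import Any, Dict, List, Optional, Set, Tuple
--
-- SAC_HIERARCHY: Dict[str, int] = {
--     "hiking": 0,
--     "mountain_hiking": 1,
--     "demanding_mountain_hiking": 2,
--     "alpine_hiking": 3,
--     "demanding_alpine_hiking": 4,
--     "difficult_alpine_hiking": 5,
-- }
--
-- def compute_sac_scale_from_segments(
--     segments: List[Dict[str, Any]],
-- ) -> Optional[str]:
--     """Derive the highest sac_scale difficulty from member segments."""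
--     scales = [
--         s.get("sac_scale")
--         for s in segments
--         if s.get("sac_scale") and s.get("sac_scale") in SAC_HIERARCHY
--     ]
--     if not scales:
--         return None
--     # Pick the hardest (highest) scale found across segments
--     return max(scales, key=lambda s: SAC_HIERARCHY[s])
-- ===== SOURCE B (Python) =====
-- SAC_HIERARCHY = {
--     "hiking": 0,
--     "mountain_hiking": 1,
--     "demanding_mountain_hiking": 2,
--     "alpine_hiking": 3,
--     "demanding_alpine_hiking": 4,
--     "difficult_alpine_hiking": 5,
-- }
--
--
-- def compute_sac_scale_from_segments(segments):
--     """Derive the highest sac_scale difficulty from member segments."""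
--     present = set()
--     for s in segments:
--         v = s.get("sac_scale")
--         if v and v in SAC_HIERARCHY:
--             present.add(v)
--     # Walk the fixed hierarchy from hardest to easiest; first hit wins.
--     for scale in reversed(SAC_HIERARCHY):
--         if scale in present:
--             return scale
--     return None
-- ===== Notes on version B (the rewrite author's own statement) =====
-- stated objective: alternative
-- what changed: A collects valid scales from segments and takes a max keyed by hierarchy rank; B builds the set of valid scales in one pass and walks the fixed SAC hierarchy from hardest to easiest, returning the first scale present.
import Mathlib
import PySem

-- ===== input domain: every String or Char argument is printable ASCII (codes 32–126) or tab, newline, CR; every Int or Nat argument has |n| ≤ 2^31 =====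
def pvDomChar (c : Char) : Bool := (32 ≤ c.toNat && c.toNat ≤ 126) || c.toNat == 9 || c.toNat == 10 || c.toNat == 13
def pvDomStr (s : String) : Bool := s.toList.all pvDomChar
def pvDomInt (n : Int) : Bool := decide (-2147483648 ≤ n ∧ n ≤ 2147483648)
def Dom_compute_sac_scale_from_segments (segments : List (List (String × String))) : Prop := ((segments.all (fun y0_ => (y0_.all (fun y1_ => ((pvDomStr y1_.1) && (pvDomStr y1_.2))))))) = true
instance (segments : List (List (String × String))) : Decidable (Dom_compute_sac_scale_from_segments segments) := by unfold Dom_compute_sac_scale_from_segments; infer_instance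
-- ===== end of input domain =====

-- B replaces A's scan-for-max over the segments by one pass collecting the valid scales
-- into a set followed by a first-hit scan of the fixed hierarchy from hardest to easiest
-- (objective: alternative decomposition, same cost).

-- SAC_HIERARCHY (module-level constant shared by both Pythons)
def pvSAC : PySem.Dict String Int := PySem.Dict.ofList
  [("hiking", 0), ("mountain_hiking", 1), ("demanding_mountain_hiking", 2),
   ("alpine_hiking", 3), ("demanding_alpine_hiking", 4), ("difficult_alpine_hiking", 5)]

-- ===== PORT A =====
-- list comprehension over segments, then max(..., key=lambda s: SAC_HIERARCHY[s]).
-- Every element of `scales` is a key of pvSAC, so `getD v 0` never falls back to its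
-- default and is exactly Python's SAC_HIERARCHY[s] there.
def compute_sac_scale_from_segments (segments : List (List (String × String))) : Option String :=
  let scales := segments.filterMap (fun s =>
    let g := (PySem.Dict.mk s).get? "sac_scale"
    if (match g with | some v => v != "" | none => false)
       && (match g with | some v => pvSAC.contains v | none => false)
    then g else none)
  if scales = [] then none
  else PySem.List.max? scales (fun v => pvSAC.getD v 0)

-- ===== PORT B =====
-- one pass building the set of valid scales, then the first hit walking the
-- hierarchy keys from hardest to easiest (reversed(SAC_HIERARCHY)).
def compute_sac_scale_from_segments_alt (segments : List (List (String × String))) : Option String :=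
  let present := segments.foldl (fun acc s =>
    match (PySem.Dict.mk s).get? "sac_scale" with
    | some v => if v != "" && pvSAC.contains v then PySem.Set.add acc v else acc
    | none => acc) PySem.Set.empty
  pvSAC.keys.reverse.find? (fun k => present.contains k)

-- ===== PRECONDITION & SPEC =====
def Spec_compute_sac_scale_from_segments (segments : List (List (String × String))) (out : Option String) : Prop := out = compute_sac_scale_from_segments_alt segments
instance (segments : List (List (String × String))) (out : Option String) : Decidable (Spec_compute_sac_scale_from_segments segments out) := by unfold Spec_compute_sac_scale_from_segments; infer_instance

-- ===== CLAIM (what is proved, stated in full; the proofs are below) =====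
def Claim_equal_compute_sac_scale_from_segments : Prop := ∀ (segments : List (List (String × String))), Dom_compute_sac_scale_from_segments segments → Spec_compute_sac_scale_from_segments segments (compute_sac_scale_from_segments segments)

-- ===== LEMMAS AND PROOFS =====

-- the per-segment extraction both ports perform (A's comprehension clause)
def pvF (s : List (String × String)) : Option String :=
  let g := (PySem.Dict.mk s).get? "sac_scale"
  if (match g with | some v => v != "" | none => false)
     && (match g with | some v => pvSAC.contains v | none => false)
  then g else none

-- B's step does exactly: add the extracted scale when A's comprehension keeps it
theorem pv_step (acc : PySem.Set String) (s : List (String × String)) :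
    (match (PySem.Dict.mk s).get? "sac_scale" with
     | some v => if v != "" && pvSAC.contains v then PySem.Set.add acc v else acc
     | none => acc)
    = match pvF s with
      | some v => PySem.Set.add acc v
      | none => acc := by
  unfold pvF
  cases hg : (PySem.Dict.mk s).get? "sac_scale" with
  | none => simp
  | some v =>
    by_cases hc : (v != "" && pvSAC.contains v) = true
    · simp [hc]
    · simp [hc]

-- B's set-building loop collects exactly the elements of A's comprehension
theorem pv_fold_eq (segs : List (List (String × String))) (acc : PySem.Set String) :
    segs.foldl (fun acc s =>
      match (PySem.Dict.mk s).get? "sac_scale" with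
      | some v => if v != "" && pvSAC.contains v then PySem.Set.add acc v else acc
      | none => acc) acc
    = (segs.filterMap pvF).foldl PySem.Set.add acc := by
  induction segs generalizing acc with
  | nil => rfl
  | cons s t ih =>
    rw [List.foldl_cons, pv_step acc s, List.filterMap_cons]
    cases hf : pvF s with
    | none => simpa using ih acc
    | some v => simpa using ih (PySem.Set.add acc v)

-- every collected scale is a key of SAC_HIERARCHY
theorem pv_mem_keys {L : List (List (String × String))} {v : String}
    (hv : v ∈ L.filterMap pvF) : pvSAC.contains v = true := by
  rcases List.mem_filterMap.mp hv with ⟨s, _, hs⟩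
  unfold pvF at hs
  cases hg : (PySem.Dict.mk s).get? "sac_scale" with
  | none => simp [hg] at hs
  | some w =>
    simp only [hg] at hs
    by_cases hc : (w != "" && pvSAC.contains w) = true
    · simp only [hc, if_pos] at hs
      cases hs
      rw [Bool.and_eq_true] at hc
      exact hc.2
    · simp [hc] at hs

-- core fact: the first key of the reversed hierarchy present among the collected
-- scales is exactly the maximum of those scales under the hierarchy ranks
theorem pv_main (L : List String) (h : ∀ v ∈ L, pvSAC.contains v = true) :
    (if L = [] then none else PySem.List.max? L (fun v => pvSAC.getD v 0))
    = pvSAC.keys.reverse.find? (fun k => (PySem.Set.ofList L).contains k) := by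
  have hrev : pvSAC.keys.reverse =
      ["difficult_alpine_hiking", "demanding_alpine_hiking", "alpine_hiking",
       "demanding_mountain_hiking", "mountain_hiking", "hiking"] := by decide
  by_cases hL : L = []
  · subst hL; decide
  · cases hm : PySem.List.max? L (fun v => pvSAC.getD v 0) with
    | none => exact absurd ((PySem.List.max?_eq_none_iff _ _).mp hm) hL
    | some m =>
      have hmemL : m ∈ L := PySem.List.max?_mem hm
      have hmax := PySem.List.max?_isMax hm
      have hyes : decide (m ∈ L) = true := decide_eq_true hmemL
      have hnot : ∀ k, pvSAC.getD m 0 < pvSAC.getD k 0 → decide (k ∈ L) = false := by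
        intro k hk
        simp only [decide_eq_false_iff_not]
        intro hkL
        exact absurd (hmax k hkL) (not_le.mpr hk)
      have hkey : m ∈ pvSAC.keys.reverse := by
        rw [List.mem_reverse, ← PySem.Dict.contains_iff_mem_keys]
        exact h m hmemL
      rw [if_neg hL, hrev]
      rw [hrev] at hkey
      fin_cases hkey
      · simp [hyes]
      · simp [hyes,
              hnot "difficult_alpine_hiking" (by decide)]
      · simp [hyes,
              hnot "difficult_alpine_hiking" (by decide),
              hnot "demanding_alpine_hiking" (by decide)]
      · simp [hyes,
              hnot "difficult_alpine_hiking" (by decide),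
              hnot "demanding_alpine_hiking" (by decide),
              hnot "alpine_hiking" (by decide)]
      · simp [hyes,
              hnot "difficult_alpine_hiking" (by decide),
              hnot "demanding_alpine_hiking" (by decide),
              hnot "alpine_hiking" (by decide),
              hnot "demanding_mountain_hiking" (by decide)]
      · simp [hyes,
              hnot "difficult_alpine_hiking" (by decide),
              hnot "demanding_alpine_hiking" (by decide),
              hnot "alpine_hiking" (by decide),
              hnot "demanding_mountain_hiking" (by decide),
              hnot "mountain_hiking" (by decide)]

-- ===== VERDICT (by name: the statement is the Claim_ definition above) =====
theorem compute_sac_scale_from_segments_spec : Claim_equal_compute_sac_scale_from_segments := by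
  intro segments _
  unfold Spec_compute_sac_scale_from_segments
  unfold compute_sac_scale_from_segments compute_sac_scale_from_segments_alt
  rw [pv_fold_eq]
  have hofl : (segments.filterMap pvF).foldl PySem.Set.add PySem.Set.empty
      = PySem.Set.ofList (segments.filterMap pvF) := rfl
  rw [hofl, ← pv_main _ (fun v hv => pv_mem_keys hv)]
  rfl
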